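-- pv_equiv track=rewrite | github.com/oparra2097/georisk | scripts/build_country_aliases.py | build_alias_set
-- ===== SOURCE A (Python) =====
-- TOP_CITIES_PER_COUNTRY = 3
--
-- def build_alias_set(name, cities, override):
--     aliases = set()
--     aliases.add(name)
--
--     # GeoNames top cities
--     for city_name, _pop in cities[:TOP_CITIES_PER_COUNTRY]:
--         aliases.add(city_name)
--
--     # Overrides: additions
--     for token in (override or {}).get('add', []):
--         aliases.add(token)
--
--     # Overrides: removals
--     for token in (override or {}).get('remove', []):
--         # case-insensitive match
--         aliases = {a for a in aliases if a.lower() != token.lower()}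
--
--     # Drop empty / very short tokens that cause false positives
--     aliases = {a.strip() for a in aliases if a and len(a.strip()) >= 3}
--     return sorted(aliases, key=lambda s: (-len(s), s.lower()))
-- ===== SOURCE B (Python) =====
-- TOP_CITIES_PER_COUNTRY = 3
--
-- def build_alias_set(name, cities, override):
--     ov = override or {}
--     removes = [t.lower() for t in ov.get('remove', [])]
--     cands = [name] + [c for c, _ in cities[:TOP_CITIES_PER_COUNTRY]] + list(ov.get('add', []))
--     kept = sorted((c.strip() for c in cands
--                    if len(c.strip()) >= 3 and c.lower() not in removes),
--                   key=lambda s: (-len(s), s.lower(), s))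
--     out = []
--     for s in kept:
--         if not out or out[-1] != s:
--             out.append(s)
--     return out
-- ===== Notes on version B (the rewrite author's own statement) =====
-- stated objective: alternative
-- what changed: A accumulates a Python set, rebuilds it once per remove token and strips/filters it in a final set comprehension before sorting; B never uses a set: it filters the candidate list once against the lowered remove tokens, sorts the stripped survivors by an injective 3-component key (-len, lower, s) and deduplicates with a single adjacent-duplicate scan over the sorted list.
-- outside the precondition, e.g. on build_alias_set('abc', [('AbC', 1)], {'remove': ['ABC']}): A returns [], B returns []
import Mathlib
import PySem

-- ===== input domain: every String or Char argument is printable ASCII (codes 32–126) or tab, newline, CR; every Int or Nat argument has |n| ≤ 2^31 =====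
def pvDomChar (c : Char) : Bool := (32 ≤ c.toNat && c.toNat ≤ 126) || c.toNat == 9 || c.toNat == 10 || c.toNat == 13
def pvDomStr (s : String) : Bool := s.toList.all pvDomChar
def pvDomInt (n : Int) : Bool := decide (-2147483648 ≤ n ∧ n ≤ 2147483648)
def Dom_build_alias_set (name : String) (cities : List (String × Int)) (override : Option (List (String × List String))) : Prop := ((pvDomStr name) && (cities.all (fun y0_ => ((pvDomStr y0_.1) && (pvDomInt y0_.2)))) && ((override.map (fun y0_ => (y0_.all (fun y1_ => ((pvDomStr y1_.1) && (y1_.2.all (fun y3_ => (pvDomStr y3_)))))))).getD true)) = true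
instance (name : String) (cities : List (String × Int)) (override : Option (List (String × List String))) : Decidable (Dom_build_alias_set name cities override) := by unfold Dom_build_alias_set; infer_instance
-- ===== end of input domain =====

-- B drops A's set pipeline entirely: it filters the candidate list once against the
-- lowered remove tokens, sorts the stripped survivors by an injective 3-component key
-- and deduplicates by a single adjacent-duplicate scan (objective: alternative).

-- ===== PORT A =====
def build_alias_set (name : String) (cities : List (String × Int)) (override : Option (List (String × List String))) : List String :=
  let aliases : PySem.Set String := PySem.Set.add PySem.Set.empty name
  let aliases := (PySem.List.slice cities none (some 3)).foldl (fun s p => PySem.Set.add s p.1) aliases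
  let aliases := (PySem.Dict.getD (PySem.Dict.mk (override.getD [])) "add" []).foldl (fun s t => PySem.Set.add s t) aliases
  let aliases := (PySem.Dict.getD (PySem.Dict.mk (override.getD [])) "remove" []).foldl
      (fun s t => s.filter (fun a => PySem.Str.lower a != PySem.Str.lower t)) aliases
  let aliases := PySem.Set.ofList
      ((aliases.filter (fun a => a != "" && decide (3 ≤ PySem.Str.len (PySem.Str.strip a)))).map PySem.Str.strip)
  PySem.List.sorted2 aliases (fun s => -(PySem.Str.len s)) (fun s => PySem.Str.lower s)

-- ===== PORT B =====
def pvLt3 (a b : String) : Bool :=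
  decide (-(PySem.Str.len a) < -(PySem.Str.len b))
    || (!decide (-(PySem.Str.len b) < -(PySem.Str.len a))
      && (decide (PySem.Str.lower a < PySem.Str.lower b)
        || (!decide (PySem.Str.lower b < PySem.Str.lower a) && decide (a < b))))

def build_alias_set_alt (name : String) (cities : List (String × Int)) (override : Option (List (String × List String))) : List String :=
  let ov := PySem.Dict.mk (override.getD [])
  let removes := (PySem.Dict.getD ov "remove" []).map PySem.Str.lower
  let cands := name :: ((PySem.List.slice cities none (some 3)).map Prod.fst ++ PySem.Dict.getD ov "add" [])
  -- hand port of sorted(..., key=lambda s: (-len(s), s.lower(), s)): Python's stable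
  -- insertion sort by the strict-less pvLt3 of the lexicographic 3-tuple key; exact on
  -- every input (the third key component is the element itself, so the key is injective
  -- and stability is moot)
  let kept := ((cands.filter (fun c => decide (3 ≤ PySem.Str.len (PySem.Str.strip c))
          && !(removes.contains (PySem.Str.lower c)))).map PySem.Str.strip).foldl
      (fun acc x => PySem.List.insertBy pvLt3 x acc) []
  -- the appending loop: `if not out or out[-1] != s: out.append(s)`
  kept.foldl (fun out s =>
      if out.isEmpty || (PySem.List.pyGet? out (-1) != some s) then out ++ [s] else out) []

-- ===== PRECONDITION & SPEC =====
-- Pre_ excludes inputs where two distinct (after stripping) candidate aliases coincide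
-- case-insensitively: there A's and B's output order on such a sort-key tie is an accident
-- of Python's set iteration (hash) order, which neither value can claim over the other.
def Pre_build_alias_set (name : String) (cities : List (String × Int)) (override : Option (List (String × List String))) : Prop :=
  ∀ a ∈ (name :: (PySem.List.slice cities none (some 3)).map Prod.fst
          ++ PySem.Dict.getD (PySem.Dict.mk (override.getD [])) "add" []),
  ∀ b ∈ (name :: (PySem.List.slice cities none (some 3)).map Prod.fst
          ++ PySem.Dict.getD (PySem.Dict.mk (override.getD [])) "add" []),
    PySem.Str.lower (PySem.Str.strip a) = PySem.Str.lower (PySem.Str.strip b) →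
      PySem.Str.strip a = PySem.Str.strip b
instance (name : String) (cities : List (String × Int)) (override : Option (List (String × List String))) : Decidable (Pre_build_alias_set name cities override) := by unfold Pre_build_alias_set; infer_instance
def pvWitness_build_alias_set : String × (List (String × Int)) × (Option (List (String × List String))) :=
  ("Germany", [("Berlin", 10)], none)
def Spec_build_alias_set (name : String) (cities : List (String × Int)) (override : Option (List (String × List String))) (out : List String) : Prop := out = build_alias_set_alt name cities override
instance (name : String) (cities : List (String × Int)) (override : Option (List (String × List String))) (out : List String) : Decidable (Spec_build_alias_set name cities override out) := by unfold Spec_build_alias_set; infer_instance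

-- ===== CLAIM (what is proved, stated in full; the proofs are below) =====
def Claim_equal_build_alias_set : Prop := ∀ (name : String) (cities : List (String × Int)) (override : Option (List (String × List String))), Dom_build_alias_set name cities override → Pre_build_alias_set name cities override → Spec_build_alias_set name cities override (build_alias_set name cities override)

-- ===== LEMMAS AND PROOFS =====

-- B's 3-component sort key (-len(s), s.lower(), s) as a lexicographic product
-- (Python tuple keys compare lexicographically, which is ×ₗ, not Prod's pointwise order)
def pvKey3 (s : String) : Int ×ₗ (String ×ₗ String) :=
  toLex (-(PySem.Str.len s), toLex (PySem.Str.lower s, s))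


-- structural form of B's adjacent-duplicate scan
def pvGo (prev : String) : List String → List String
  | [] => []
  | x :: xs => if x = prev then pvGo prev xs else x :: pvGo x xs

def pvDedup : List String → List String
  | [] => []
  | x :: xs => x :: pvGo x xs

theorem pvGo_cons_self (prev : String) (xs : List String) :
    pvGo prev (prev :: xs) = pvGo prev xs := by
  simp [pvGo]

theorem pvGo_cons_ne (prev x : String) (xs : List String) (h : x ≠ prev) :
    pvGo prev (x :: xs) = x :: pvGo x xs := by
  simp [pvGo, h]

-- out[-1] is the last element
theorem pyGet_neg_one (xs : List String) : PySem.List.pyGet? xs (-1) = xs.getLast? := by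
  cases xs with
  | nil => rfl
  | cons x t =>
    simp [PySem.List.pyGet?, PySem.List.pyIdx?]
    rw [List.getLast?_eq_getElem?]
    simp

-- B's foldl loop is the structural scan pvDedup
theorem foldl_dedup_go (l : List String) :
    ∀ (out : List String) (prev : String), out.getLast? = some prev →
      l.foldl (fun out s =>
          if out.isEmpty || (PySem.List.pyGet? out (-1) != some s) then out ++ [s] else out) out
        = out ++ pvGo prev l := by
  induction l with
  | nil => intro out prev _; simp [pvGo]
  | cons x xs ih =>
    intro out prev hlast
    have hne : out ≠ [] := by intro h; rw [h] at hlast; simp at hlast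
    rw [List.foldl_cons]
    have hstep : (if (out.isEmpty || (PySem.List.pyGet? out (-1) != some x)) = true
        then out ++ [x] else out) = if x = prev then out else out ++ [x] := by
      rw [pyGet_neg_one, hlast]
      by_cases hx : x = prev
      · subst hx
        simp [List.isEmpty_iff, hne]
      · simp [List.isEmpty_iff, hne, hx, Ne.symm hx]
    rw [hstep]
    by_cases hx : x = prev
    · rw [if_pos hx, ih out prev hlast, hx, pvGo_cons_self]
    · rw [if_neg hx, ih (out ++ [x]) x (by simp), pvGo_cons_ne prev x xs hx]
      simp

theorem foldl_dedup_eq_pvDedup (l : List String) :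
    l.foldl (fun out s =>
        if out.isEmpty || (PySem.List.pyGet? out (-1) != some s) then out ++ [s] else out) []
      = pvDedup l := by
  cases l with
  | nil => rfl
  | cons x xs =>
    rw [List.foldl_cons]
    have h0 : (if (List.isEmpty ([] : List String)
          || (PySem.List.pyGet? ([] : List String) (-1) != some x)) = true
        then ([] : List String) ++ [x] else []) = [x] := by simp
    rw [h0, foldl_dedup_go xs [x] x rfl]
    rfl

-- the 3-component key is injective (third component)
theorem pvKey3_inj {a b : String} (h : pvKey3 a = pvKey3 b) : a = b := by
  simp only [pvKey3, toLex_inj, Prod.mk.injEq] at h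
  exact h.2.2

-- membership through the adjacent-duplicate scan
theorem mem_go (l : List String) :
    ∀ (prev y : String), (y ∈ prev :: pvGo prev l) ↔ (y ∈ prev :: l) := by
  induction l with
  | nil => intro prev y; simp [pvGo]
  | cons x xs ih =>
    intro prev y
    by_cases hx : x = prev
    · subst hx
      rw [pvGo_cons_self, ih x y]
      simp
    · rw [pvGo_cons_ne prev x xs hx]
      constructor
      · intro h
        rcases List.mem_cons.mp h with h | h
        · exact h ▸ List.mem_cons_self
        · rcases List.mem_cons.mp ((ih x y).mp h) with h | h
          · exact h ▸ (by simp)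
          · simp [h]
      · intro h
        rcases List.mem_cons.mp h with h | h
        · exact h ▸ List.mem_cons_self
        · rcases List.mem_cons.mp h with h | h
          · exact List.mem_cons_of_mem _ ((ih x y).mpr (h ▸ List.mem_cons_self))
          · exact List.mem_cons_of_mem _ ((ih x y).mpr (List.mem_cons_of_mem _ h))

-- on a key-sorted list, the scan yields a strictly key-increasing list
theorem go_pairwise (l : List String) :
    ∀ (prev : String), (prev :: l).Pairwise (fun a b => pvKey3 a ≤ pvKey3 b) →
      (prev :: pvGo prev l).Pairwise (fun a b => pvKey3 a < pvKey3 b) := by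
  induction l with
  | nil => intro prev _; simp [pvGo]
  | cons x xs ih =>
    intro prev h
    rcases List.pairwise_cons.mp h with ⟨hprev, htail⟩
    by_cases hx : x = prev
    · subst hx
      rw [pvGo_cons_self]
      refine ih x (List.pairwise_cons.mpr ⟨?_, (List.pairwise_cons.mp htail).2⟩)
      exact fun y hy => (List.pairwise_cons.mp htail).1 y hy
    · rw [pvGo_cons_ne prev x xs hx]
      have hlt : pvKey3 prev < pvKey3 x :=
        lt_of_le_of_ne (hprev x List.mem_cons_self)
          (fun he => hx (pvKey3_inj he).symm)
      have hrest := ih x htail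
      refine List.pairwise_cons.mpr ⟨?_, hrest⟩
      intro y hy
      rcases List.mem_cons.mp ((mem_go xs x y).mp hy) with h | h
      · exact h ▸ hlt
      · exact lt_of_lt_of_le hlt ((List.pairwise_cons.mp htail).1 y h)

-- sort-then-scan dedup equals dedup-then-sort (the key is injective, so equal
-- elements are adjacent after sorting)
theorem pvDedup_sorted (l : List String) :
    pvDedup (PySem.List.sorted l pvKey3) = PySem.List.sorted (PySem.Set.ofList l) pvKey3 := by
  rcases hs : PySem.List.sorted l pvKey3 with _ | ⟨m, t⟩
  · have hl : l = [] := (PySem.List.sorted_eq_nil_iff l pvKey3 false).mp hs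
    subst hl
    rfl
  · have hpair_le : (m :: t).Pairwise (fun a b => pvKey3 a ≤ pvKey3 b) := by
      rw [← hs]; exact PySem.List.sorted_pairwise l pvKey3
    have hpair : (m :: pvGo m t).Pairwise (fun a b => pvKey3 a < pvKey3 b) :=
      go_pairwise t m hpair_le
    have hnodup : (m :: pvGo m t).Nodup :=
      hpair.imp (fun hab => fun he => absurd (he ▸ hab) (lt_irrefl _))
    have hmem : ∀ y, y ∈ m :: pvGo m t ↔ y ∈ PySem.Set.ofList l := by
      intro y
      rw [mem_go t m y, ← hs, PySem.List.mem_sorted, PySem.Set.mem_ofList]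
    have hperm : (m :: pvGo m t).Perm (PySem.Set.ofList l) :=
      (List.perm_ext_iff_of_nodup hnodup (PySem.Set.nodup_ofList l)).mpr hmem
    exact (PySem.List.sorted_eq_of_perm_of_pairwise_lt _ _ pvKey3 hperm hpair).symm

-- a chain of per-token filters is one filter by the conjunction of the tests
theorem foldl_filter_all {α β : Type} (p : β → α → Bool) (l : List β) :
    ∀ (s : List α),
      l.foldl (fun s t => s.filter (p t)) s = s.filter (fun a => l.all (fun t => p t a)) := by
  induction l with
  | nil => intro s; simp
  | cons t l ih =>
    intro s
    simp only [List.foldl_cons, ih, List.filter_filter, List.all_cons]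
    exact List.filter_congr (fun a _ => Bool.and_comm _ _)

-- dedup-then-filter-map-dedup equals filter-map-dedup: dropping a later duplicate
-- candidate never changes the final set
theorem ofList_filter_map_foldl_add {α β : Type} [BEq α] [LawfulBEq α] [BEq β] [LawfulBEq β]
    (q : α → Bool) (f : α → β) (l : List α) :
    ∀ (s : List α),
      PySem.Set.ofList (((l.foldl PySem.Set.add s).filter q).map f)
        = PySem.Set.update (PySem.Set.ofList ((s.filter q).map f)) ((l.filter q).map f) := by
  induction l with
  | nil => intro s; simp [PySem.Set.update]
  | cons x l ih =>
    intro s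
    simp only [List.foldl_cons]
    rw [ih]
    by_cases hx : PySem.Set.contains s x = true
    · have hxs : x ∈ s := (PySem.Set.contains_iff s x).mp hx
      have hadd : PySem.Set.add s x = s := by
        simp [PySem.Set.add, hxs]
      rw [hadd]
      by_cases hq : q x = true
      · have hfx : f x ∈ PySem.Set.ofList ((s.filter q).map f) := by
          rw [PySem.Set.mem_ofList]
          exact List.mem_map_of_mem (List.mem_filter.mpr ⟨hxs, hq⟩)
        have hcT : PySem.Set.contains (PySem.Set.ofList ((s.filter q).map f)) (f x) = true :=
          (PySem.Set.contains_iff _ _).mpr hfx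
        have haddT : PySem.Set.add (PySem.Set.ofList ((s.filter q).map f)) (f x)
            = PySem.Set.ofList ((s.filter q).map f) := by
          simp only [PySem.Set.add, hcT, if_true]
        simp only [List.filter_cons, hq, if_pos, List.map_cons, PySem.Set.update, List.foldl_cons]
        rw [show (PySem.Set.ofList (List.map f (List.filter q s))).add (f x)
              = PySem.Set.ofList (List.map f (List.filter q s)) from haddT]
      · simp only [List.filter_cons, hq, Bool.false_eq_true, if_false]
    · have hxs : x ∉ s := fun hm => hx ((PySem.Set.contains_iff s x).mpr hm)
      have hadd : PySem.Set.add s x = s ++ [x] := by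
        simp [PySem.Set.add, hxs]
      rw [hadd]
      by_cases hq : q x = true
      · have h1 : ((s ++ [x]).filter q).map f = (s.filter q).map f ++ [f x] := by
          simp [List.filter_append, hq]
        rw [h1]
        have h2 : PySem.Set.ofList ((s.filter q).map f ++ [f x])
            = PySem.Set.add (PySem.Set.ofList ((s.filter q).map f)) (f x) := by
          rw [PySem.Set.ofList_eq_foldl, PySem.Set.ofList_eq_foldl, List.foldl_append]
          rfl
        rw [h2]
        simp only [List.filter_cons, hq, if_pos, List.map_cons, PySem.Set.update, List.foldl_cons]
      · have h1 : ((s ++ [x]).filter q).map f = (s.filter q).map f := by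
          simp [List.filter_append, hq]
        rw [h1]
        simp only [List.filter_cons, hq, Bool.false_eq_true, if_false]

-- insertBy only consults `before` between the inserted element and the list's elements
theorem insertBy_congr {α : Type} (p p' : α → α → Bool) (x : α) :
    ∀ (ys : List α), (∀ y ∈ ys, p x y = p' x y) →
      PySem.List.insertBy p x ys = PySem.List.insertBy p' x ys := by
  intro ys
  induction ys with
  | nil => intro _; rfl
  | cons y ys ih =>
    intro h
    simp only [PySem.List.insertBy]
    rw [h y (List.mem_cons_self), ih (fun z hz => h z (List.mem_cons_of_mem y hz))]

-- a foldl of insertions is unchanged when the two orders agree on the list's elements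
theorem foldl_insertBy_congr {α : Type} (p p' : α → α → Bool) :
    ∀ (xs acc : List α), (∀ a ∈ xs, ∀ b, (b ∈ xs ∨ b ∈ acc) → p a b = p' a b) →
      xs.foldl (fun acc x => PySem.List.insertBy p x acc) acc
        = xs.foldl (fun acc x => PySem.List.insertBy p' x acc) acc := by
  intro xs
  induction xs with
  | nil => intro acc _; rfl
  | cons x xs ih =>
    intro acc h
    simp only [List.foldl_cons]
    rw [insertBy_congr p p' x acc
        (fun y hy => h x List.mem_cons_self y (Or.inr hy))]
    refine ih (PySem.List.insertBy p' x acc) (fun a ha b hb => ?_)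
    refine h a (List.mem_cons_of_mem x ha) b ?_
    rcases hb with hb | hb
    · exact Or.inl (List.mem_cons_of_mem x hb)
    · rcases (PySem.List.mem_insertBy _ _ _ _).mp hb with hb | hb
      · exact Or.inl (hb ▸ List.mem_cons_self)
      · exact Or.inr hb

-- pvLt3 is the strict-less of the lexicographic 3-component key
theorem lt3_eq_key (a b : String) : pvLt3 a b = decide (pvKey3 a < pvKey3 b) := by
  rw [Bool.eq_iff_iff]
  simp only [pvLt3, Bool.or_eq_true, Bool.and_eq_true, Bool.not_eq_true', decide_eq_true_eq,
    decide_eq_false_iff_not, pvKey3, Prod.Lex.lt_iff, ofLex_toLex]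
  constructor
  · rintro (h | ⟨h1, hw | ⟨h2, hab⟩⟩)
    · exact Or.inl h
    · rcases lt_trichotomy (-(PySem.Str.len a)) (-(PySem.Str.len b)) with h | h | h
      · exact Or.inl h
      · exact Or.inr ⟨h, Or.inl hw⟩
      · exact absurd h h1
    · rcases lt_trichotomy (-(PySem.Str.len a)) (-(PySem.Str.len b)) with h | h | h
      · exact Or.inl h
      · rcases lt_trichotomy (PySem.Str.lower a) (PySem.Str.lower b) with hw | hw | hw
        · exact Or.inr ⟨h, Or.inl hw⟩
        · exact Or.inr ⟨h, Or.inr ⟨hw, hab⟩⟩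
        · exact absurd hw h2
      · exact absurd h h1
  · rintro (h | ⟨heq, hw | ⟨hweq, hab⟩⟩)
    · exact Or.inl h
    · exact Or.inr ⟨not_lt.mpr (le_of_eq heq), Or.inl hw⟩
    · exact Or.inr ⟨not_lt.mpr (le_of_eq heq),
        Or.inr ⟨not_lt.mpr (le_of_eq hweq), hab⟩⟩

-- sorted2's strict-less agrees with pvKey3's strict-less between elements whose
-- lowercase forms only coincide when the elements do
theorem lt2_eq_lt3 (a b : String) (hinj : PySem.Str.lower a = PySem.Str.lower b → a = b) :
    (decide (-(PySem.Str.len a) < -(PySem.Str.len b))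
      || (!decide (-(PySem.Str.len b) < -(PySem.Str.len a))
        && decide (PySem.Str.lower a < PySem.Str.lower b)))
    = decide (pvKey3 a < pvKey3 b) := by
  rw [Bool.eq_iff_iff]
  simp only [Bool.or_eq_true, Bool.and_eq_true, Bool.not_eq_true', decide_eq_true_eq,
    decide_eq_false_iff_not, pvKey3, Prod.Lex.lt_iff, ofLex_toLex]
  constructor
  · rintro (h | ⟨h1, h2⟩)
    · exact Or.inl h
    · rcases lt_trichotomy (-(PySem.Str.len a)) (-(PySem.Str.len b)) with h | h | h
      · exact Or.inl h
      · exact Or.inr ⟨h, Or.inl h2⟩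
      · exact absurd h h1
  · rintro (h | ⟨heq, hw | ⟨hweq, hab⟩⟩)
    · exact Or.inl h
    · exact Or.inr ⟨not_lt.mpr (le_of_eq heq), hw⟩
    · exact absurd ((hinj hweq) ▸ hab) (lt_irrefl a)
-- on a list with no distinct case-insensitive duplicates, A's 2-component-key sort
-- equals B's 3-component-key sort
theorem sorted2_eq_sorted_key3 (xs : List String)
    (h : ∀ x ∈ xs, ∀ y ∈ xs, PySem.Str.lower x = PySem.Str.lower y → x = y) :
    PySem.List.sorted2 xs (fun s => -(PySem.Str.len s)) (fun s => PySem.Str.lower s)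
      = PySem.List.sorted xs pvKey3 := by
  unfold PySem.List.sorted2
  rw [PySem.List.sorted_eq_foldl_insertBy]
  simp only [if_neg (by decide : ¬(false = true))]
  refine foldl_insertBy_congr _ _ xs [] (fun a ha b hb => ?_)
  rcases hb with hb | hb
  · exact lt2_eq_lt3 a b (h a ha b hb)
  · simp at hb

-- A's combined element test equals B's element test, pointwise
theorem pred_eq (R : List String) (a : String) :
    ((a != "" && decide (3 ≤ PySem.Str.len (PySem.Str.strip a)))
        && R.all (fun t => PySem.Str.lower a != PySem.Str.lower t))
    = (decide (3 ≤ PySem.Str.len (PySem.Str.strip a))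
      && !((R.map PySem.Str.lower).contains (PySem.Str.lower a))) := by
  have hc : (R.map PySem.Str.lower).contains (PySem.Str.lower a)
      = !(R.all (fun t => PySem.Str.lower a != PySem.Str.lower t)) := by
    rcases h : (R.map PySem.Str.lower).contains (PySem.Str.lower a) with _ | _
    · have hmem : PySem.Str.lower a ∉ R.map PySem.Str.lower := by
        intro hm
        exact Bool.false_ne_true (h ▸ List.contains_iff_mem.mpr hm)
      have hall : R.all (fun t => PySem.Str.lower a != PySem.Str.lower t) = true := by
        rw [List.all_eq_true]
        intro t ht
        simp only [bne_iff_ne, ne_eq]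
        intro he
        exact hmem (he ▸ List.mem_map_of_mem ht)
      simp [hall]
    · have hmem : PySem.Str.lower a ∈ R.map PySem.Str.lower := List.contains_iff_mem.mp h
      rcases List.mem_map.mp hmem with ⟨t, ht, he⟩
      have hall : R.all (fun t => PySem.Str.lower a != PySem.Str.lower t) = false := by
        rw [List.all_eq_false]
        exact ⟨t, ht, by simp [he]⟩
      simp [hall]
  rw [hc, Bool.not_not]
  by_cases ha : a = ""
  · subst ha
    simp
  · rw [show (a != "") = true by simp [ha], Bool.true_and]

-- ===== VERDICT (by name: the statement is the Claim_ definition above) =====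
set_option maxHeartbeats 1000000 in
theorem build_alias_set_spec : Claim_equal_build_alias_set := by
  intro name cities override _ hpre
  unfold Pre_build_alias_set at hpre
  unfold Spec_build_alias_set build_alias_set build_alias_set_alt
  dsimp only
  set M := (PySem.List.slice cities none (some 3)).map Prod.fst with hM
  set R := PySem.Dict.getD (PySem.Dict.mk (override.getD [])) "remove" [] with hR
  set Adds := PySem.Dict.getD (PySem.Dict.mk (override.getD [])) "add" [] with hAdds
  set C := name :: (M ++ Adds) with hC
  -- A's first three phases build ofList C
  have hS0 :
      Adds.foldl (fun s t => PySem.Set.add s t)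
        ((PySem.List.slice cities none (some 3)).foldl (fun s p => PySem.Set.add s p.1)
          (PySem.Set.add PySem.Set.empty name))
      = C.foldl PySem.Set.add PySem.Set.empty := by
    have h1 : (PySem.List.slice cities none (some 3)).foldl (fun s p => PySem.Set.add s p.1)
        (PySem.Set.add PySem.Set.empty name)
        = M.foldl PySem.Set.add (PySem.Set.add PySem.Set.empty name) := by
      rw [hM, ← PySem.Set.update_map_eq_foldl_add]
      simp [PySem.Set.update]
    rw [h1, hC]
    simp [List.foldl_append]
  rw [hS0, foldl_filter_all, List.filter_filter, ofList_filter_map_foldl_add]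
  simp only [PySem.Set.empty, List.filter_nil, List.map_nil,
    show PySem.Set.ofList ([] : List String) = [] from rfl, PySem.Set.update_nil_left]
  -- B's side: the insertion sort is sorted by the 3-component key ...
  rw [foldl_insertBy_congr pvLt3 (fun a b => decide (pvKey3 a < pvKey3 b)) _ []
        (fun a _ b _ => lt3_eq_key a b),
      ← PySem.List.sorted_eq_foldl_insertBy]
  -- ... the dedup loop is pvDedup, and sort-then-scan is sort of the deduped list
  rw [foldl_dedup_eq_pvDedup, pvDedup_sorted]
  -- the two filters agree
  have hf := List.filter_congr (l := C)
    (fun a _ => (pred_eq R a).symm)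
  rw [hf]
  -- and the two sorts agree under Pre_
  refine sorted2_eq_sorted_key3 _ (fun x hx y hy hl => ?_)
  rw [PySem.Set.mem_ofList] at hx hy
  rcases List.mem_map.mp hx with ⟨cx, hcx, hex⟩
  rcases List.mem_map.mp hy with ⟨cy, hcy, hey⟩
  subst hex hey
  exact hpre cx (List.mem_of_mem_filter hcx) cy (List.mem_of_mem_filter hcy) hl
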